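-- pv_equiv track=rewrite | github.com/2Delight/asd | tasks/8/problem-a-kwic/method-3/main.py | circularShift
-- ===== SOURCE A (Python) =====
-- from collections import deque
--
-- def circularShift(lines):
--     shifted_lines = []
--     for line in lines:
--         words = line.split(" ")
--         dec = deque(words)
--         for _ in range(len(dec)):
--             dec.rotate()
--             shifted_lines.append(" ".join(dec))
--     return shifted_lines
-- ===== SOURCE B (Python) =====
-- def circularShift(lines):
--     return [
--         " ".join(words[-i:] + words[:-i])
--         for words in (line.split(" ") for line in lines)
--         for i in range(1, len(words) + 1)
--     ]
-- ===== Notes on version B (the rewrite author's own statement) =====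
-- stated objective: idiomatic
-- what changed: Each circular shift is recomputed statelessly from the original word list by index slicing (words[-i:] + words[:-i]) inside one flat comprehension, instead of cumulatively mutating a rotating deque and appending inside nested loops.
import Mathlib
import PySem

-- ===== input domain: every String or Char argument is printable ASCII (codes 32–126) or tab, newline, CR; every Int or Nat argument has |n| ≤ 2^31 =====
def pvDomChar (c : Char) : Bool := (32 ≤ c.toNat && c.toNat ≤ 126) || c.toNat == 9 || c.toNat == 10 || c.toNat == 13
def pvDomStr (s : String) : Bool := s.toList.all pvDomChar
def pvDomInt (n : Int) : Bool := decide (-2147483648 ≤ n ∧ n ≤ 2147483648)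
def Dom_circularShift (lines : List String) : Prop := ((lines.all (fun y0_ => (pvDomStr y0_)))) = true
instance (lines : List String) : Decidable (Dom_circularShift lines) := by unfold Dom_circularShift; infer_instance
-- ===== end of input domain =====

-- B replaces A's stateful rotating deque with stateless per-index slicing in one flat comprehension (idiomatic; same cost).

-- ===== PORT A =====
-- dec.rotate(): move the last element to the front (no-op on an empty deque)
def pvRot (d : List String) : List String :=
  match d.getLast? with
  | none => d
  | some x => x :: d.dropLast

-- the inner 'for _ in range(len(dec))' loop: rotate, then append the join
def pvRotLoop (d acc : List String) : Nat → List String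
  | 0 => acc
  | m + 1 =>
      let d' := pvRot d
      pvRotLoop d' (acc ++ [PySem.Str.join " " d']) m

def circularShift (lines : List String) : List String :=
  lines.foldl
    (fun shifted line =>
      let words := (PySem.Str.split? line " ").getD []   -- sep ≠ "" so split? is always some
      pvRotLoop words shifted words.length)
    []

-- ===== PORT B =====
def circularShift_alt (lines : List String) : List String :=
  lines.flatMap (fun line =>
    let words := (PySem.Str.split? line " ").getD []
    (PySem.List.pyRange 1 ((words.length : Int) + 1) 1).map (fun i =>
      PySem.Str.join " "
        (PySem.List.slice words (some (-i)) none ++ PySem.List.slice words none (some (-i)))))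

-- ===== PRECONDITION & SPEC =====
def Spec_circularShift (lines : List String) (out : List String) : Prop := out = circularShift_alt lines
instance (lines : List String) (out : List String) : Decidable (Spec_circularShift lines out) := by unfold Spec_circularShift; infer_instance

-- ===== CLAIM (what is proved, stated in full; the proofs are below) =====
def Claim_equal_circularShift : Prop := ∀ (lines : List String), Dom_circularShift lines → Spec_circularShift lines (circularShift lines)

-- ===== LEMMAS AND PROOFS =====

-- one rotation step on the 'shifted by j' state
theorem pvRot_state (w : List String) (t : Nat) (h1 : 1 ≤ t) (h2 : t ≤ w.length) :
    pvRot (w.drop t ++ w.take t) = w.drop (t - 1) ++ w.take (t - 1) := by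
  have hlt : t - 1 < w.length := by omega
  have htake : w.take t ≠ [] := by
    have : (w.take t).length = t := by simp; omega
    intro hnil; rw [hnil] at this; simp at this; omega
  have hlast : (w.drop t ++ w.take t).getLast? = (w.take t).getLast? := by
    exact List.getLast?_append_of_ne_nil (w.drop t) htake
  have hlastval : (w.take t).getLast? = some w[t-1] := by
    rw [List.getLast?_eq_getElem?]
    have hl : (w.take t).length = t := by simp; omega
    rw [hl]
    simp only [List.getElem?_take, show t - 1 < t from by omega, if_pos]
    simp [List.getElem?_eq_getElem hlt]
  unfold pvRot
  rw [hlast, hlastval]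
  simp only
  have hdl : (w.take t).dropLast = w.take (t - 1) := by
    rw [List.dropLast_eq_take, List.take_take]
    congr 1
    simp
    omega
  rw [List.dropLast_append_of_ne_nil htake, hdl]
  have : w.drop (t - 1) = w[t-1] :: w.drop t := by
    have h := List.drop_eq_getElem_cons hlt
    rwa [show t - 1 + 1 = t from by omega] at h
  rw [this]
  simp

theorem pvRotLoop_spec (w : List String) (m t : Nat) (ht : m ≤ t) (h2 : t ≤ w.length) (acc : List String) :
    pvRotLoop (w.drop t ++ w.take t) acc m
      = acc ++ (List.range m).map (fun k =>
          PySem.Str.join " " (w.drop (t - (k + 1)) ++ w.take (t - (k + 1)))) := by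
  induction m generalizing t acc with
  | zero => simp [pvRotLoop]
  | succ m ih =>
      rw [pvRotLoop]
      have hr : pvRot (w.drop t ++ w.take t) = w.drop (t - 1) ++ w.take (t - 1) :=
        pvRot_state w t (by omega) h2
      simp only [hr]
      rw [ih (t - 1) (by omega) (by omega)]
      rw [List.range_succ_eq_map]
      simp only [List.map_cons, List.map_map]
      rw [List.append_assoc]
      simp only [List.singleton_append]
      have e0 : t - (0 + 1) = t - 1 := by omega
      rw [e0]
      have hm : List.map (fun k => PySem.Str.join " " (List.drop (t - 1 - (k + 1)) w ++ List.take (t - 1 - (k + 1)) w)) (List.range m)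
          = List.map ((fun k => PySem.Str.join " " (List.drop (t - (k + 1)) w ++ List.take (t - (k + 1)) w)) ∘ Nat.succ) (List.range m) := by
        apply List.map_congr_left
        intro k hk
        simp only [Function.comp, Nat.succ_eq_add_one]
        have e : t - 1 - (k + 1) = t - (k + 1 + 1) := by omega
        rw [e]
      rw [hm]

-- the per-line output of A's inner loop equals B's per-line map
theorem line_eq (w : List String) (acc : List String) :
    pvRotLoop w acc w.length
      = acc ++ (PySem.List.pyRange 1 ((w.length : Int) + 1) 1).map (fun i =>
          PySem.Str.join " "
            (PySem.List.slice w (some (-i)) none ++ PySem.List.slice w none (some (-i)))) := by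
  have h0 : w.drop w.length ++ w.take w.length = w := by simp
  have hA := pvRotLoop_spec w w.length w.length (by omega) (by omega) acc
  rw [h0] at hA
  rw [hA]
  congr 1
  rw [PySem.List.pyRange_one]
  have hlen : ((w.length : Int) + 1 - 1).toNat = w.length := by omega
  rw [hlen, List.map_map]
  apply List.map_congr_left
  intro k hk
  simp only [Function.comp, List.mem_range] at *
  have h1 : (-(1 + (k : Int))) = (-(((k + 1 : Nat)) : Int)) := by push_cast; ring
  rw [h1, PySem.List.slice_from_neg_natCast w (k + 1) (by omega),
      PySem.List.slice_to_neg_natCast w (k + 1) (by omega)]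

theorem fold_eq (lines acc : List String) :
    lines.foldl
      (fun shifted line =>
        let words := (PySem.Str.split? line " ").getD []
        pvRotLoop words shifted words.length)
      acc
    = acc ++ lines.flatMap (fun line =>
        let words := (PySem.Str.split? line " ").getD []
        (PySem.List.pyRange 1 ((words.length : Int) + 1) 1).map (fun i =>
          PySem.Str.join " "
            (PySem.List.slice words (some (-i)) none ++ PySem.List.slice words none (some (-i))))) := by
  induction lines generalizing acc with
  | nil => simp
  | cons l ls ih =>
      simp only [List.foldl_cons, List.flatMap_cons]
      rw [ih, line_eq]
      simp [List.append_assoc]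

-- ===== VERDICT (by name: the statement is the Claim_ definition above) =====
theorem circularShift_spec : Claim_equal_circularShift := by
  intro lines _
  unfold Spec_circularShift circularShift circularShift_alt
  simpa using fold_eq lines []
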